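-- pv_equiv track=rewrite | github.com/bloominstituteoftechnology/Whiteboard-Pairing | SmallestString/model_solution/model_solution.py | shortest_string
-- ===== SOURCE A (Python) =====
-- def parse_number(string, index):
--     number_length = 0
--     number_value = ''
--
--     while index < len(string) and string[index].isdigit():
--         number_length += 1
--         number_value += string[index]
--         index += 1
--
--     return (int(number_value), number_length)
--
-- def shortest_string(str1, str2):
--     s1 = 0
--     s2 = 0
--     len1 = len(str1) - 1
--     len2 = len(str2) - 1
--
--     while s1 <= len1 and s2 <= len2:
--         if str1[s1].isalpha() and str2[s2].isalpha():
--             if str1[s1] == str2[s2]: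
--                 s1 += 1
--                 s2 += 1
--             else:
--                 return str1 if str1[s1] < str2[s2] else str2
--         else:
--             if str1[s1].isdigit() and str2[s2].isdigit():
--                 n1, l1 = parse_number(str1, s1)
--                 n2, l2 = parse_number(str2, s2)
--
--                 if n1 != n2:
--                     return str1 if n1 < n2 else str2
--                 else:
--                     s1 += l1
--                     s2 += l2
--             else:
--                 return str1 if str1[s1] < str2[s2] else str2
--
--     return str1 if len1 < len2 else str2
-- ===== SOURCE B (Python) =====
-- # Tokenize-then-compare: one pass turns each string into tokens (a maximal digit
-- # run becomes one numeric token; any other char is its own token), then the two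
-- # token lists are walked in parallel.
-- def shortest_string(str1, str2):
--     def tokens(s):
--         ts = []
--         i = 0
--         while i < len(s):
--             if s[i].isdigit():
--                 j = i
--                 while j < len(s) and s[j].isdigit():
--                     j += 1
--                 ts.append((True, int(s[i:j]), s[i]))
--                 i = j
--             else:
--                 ts.append((False, 0, s[i]))
--                 i += 1
--         return ts
--     for (num1, v1, c1), (num2, v2, c2) in zip(tokens(str1), tokens(str2)):
--         if num1 and num2:
--             if v1 != v2:
--                 return str1 if v1 < v2 else str2
--         elif c1.isalpha() and c2.isalpha() and c1 == c2:
--             continue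
--         else:
--             return str1 if c1 < c2 else str2
--     return str1 if len(str1) < len(str2) else str2
-- ===== Notes on version B (the rewrite author's own statement) =====
-- stated objective: alternative
-- what changed: A's single dual-cursor character walk with on-the-fly number parsing is replaced by a tokenize-then-compare decomposition: each string is first scanned once into a token list (a maximal digit run becomes one (numeric, int value, leading char) token, any other character its own token), and the two token lists are then walked in parallel.
import Mathlib
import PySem

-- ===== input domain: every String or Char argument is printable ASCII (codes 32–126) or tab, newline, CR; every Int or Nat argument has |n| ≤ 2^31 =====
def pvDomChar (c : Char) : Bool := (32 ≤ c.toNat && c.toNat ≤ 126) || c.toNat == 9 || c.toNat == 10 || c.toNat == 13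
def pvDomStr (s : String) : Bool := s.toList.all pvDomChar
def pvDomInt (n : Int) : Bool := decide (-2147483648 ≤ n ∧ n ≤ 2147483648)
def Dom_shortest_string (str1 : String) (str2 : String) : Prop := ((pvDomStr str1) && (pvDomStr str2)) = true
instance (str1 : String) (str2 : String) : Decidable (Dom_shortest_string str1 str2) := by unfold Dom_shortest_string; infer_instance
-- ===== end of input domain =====

-- B replaces A's dual-cursor character walk by a tokenize-then-compare decomposition
-- (objective: alternative decomposition, same asymptotic cost); return values only, no mutation.
-- Loops are ported as structural recursion on an explicit fuel argument that is always
-- sufficient (a plain totality guard; the unreachable fuel-0 branches return the loop's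
-- natural exit value).

-- int(cs) for the ports: both Pythons call int() only on nonempty all-digit strings,
-- where PySem.Int.ofChars? is `some`, so the `getD 0` default is never used.
def pyIntOfDigits (cs : List Char) : Int := (PySem.Int.ofChars? cs).getD 0

-- ===== PORT A =====
-- parse_number's while loop (index stays ≥ 0 in Python, so it is a Nat here);
-- fuel = string.length - index at the call site, enough for a loop that advances index by 1
def parse_number_loop : Nat → List Char → Nat → Nat → List Char → Int × Nat
  | 0, _, _, number_length, number_value => (pyIntOfDigits number_value, number_length)
  | fuel + 1, string, index, number_length, number_value =>
    if index < string.length ∧ PySem.Chars.isdigit (string.getD index ' ') then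
      parse_number_loop fuel string (index + 1) (number_length + 1)
        (number_value ++ [string.getD index ' '])
    else
      (pyIntOfDigits number_value, number_length)

def parse_number (string : List Char) (index : Nat) : Int × Nat :=
  parse_number_loop (string.length - index) string index 0 []

-- the main while loop of A; s1 s2 are the two cursors (nonnegative Python ints);
-- fuel = len1 + len2 + 1 at the call site: every iteration advances s1 + s2 by at least 2
def loopA (str1 str2 : String) (l1 l2 : List Char) : Nat → Nat → Nat → String
  | 0, _, _ => if (l1.length : Int) - 1 < (l2.length : Int) - 1 then str1 else str2
  | fuel + 1, s1, s2 =>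
    if (s1 : Int) ≤ (l1.length : Int) - 1 ∧ (s2 : Int) ≤ (l2.length : Int) - 1 then
      if PySem.Chars.isalpha (l1.getD s1 ' ') && PySem.Chars.isalpha (l2.getD s2 ' ') then
        if l1.getD s1 ' ' = l2.getD s2 ' ' then
          loopA str1 str2 l1 l2 fuel (s1 + 1) (s2 + 1)
        else if l1.getD s1 ' ' < l2.getD s2 ' ' then str1 else str2
      else
        if PySem.Chars.isdigit (l1.getD s1 ' ') && PySem.Chars.isdigit (l2.getD s2 ' ') then
          if (parse_number l1 s1).1 ≠ (parse_number l2 s2).1 then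
            if (parse_number l1 s1).1 < (parse_number l2 s2).1 then str1 else str2
          else
            loopA str1 str2 l1 l2 fuel (s1 + (parse_number l1 s1).2) (s2 + (parse_number l2 s2).2)
        else
          if l1.getD s1 ' ' < l2.getD s2 ' ' then str1 else str2
    else
      if (l1.length : Int) - 1 < (l2.length : Int) - 1 then str1 else str2

def shortest_string (str1 : String) (str2 : String) : String :=
  loopA str1 str2 str1.toList str2.toList (str1.toList.length + str2.toList.length + 1) 0 0

-- ===== PORT B =====
-- the inner `while j < len(s) and s[j].isdigit(): j += 1` of Source B's tokenizer
def runEnd : Nat → List Char → Nat → Nat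
  | 0, _, j => j
  | fuel + 1, s, j =>
    if j < s.length ∧ PySem.Chars.isdigit (s.getD j ' ') then runEnd fuel s (j + 1) else j

def runEndAt (s : List Char) (j : Nat) : Nat := runEnd (s.length - j) s j

-- Source B's tokens(s): a maximal digit run becomes one (True, value, first char) token,
-- any other char its own (False, 0, char) token; fuel = s.length at the call site
def tokensB : Nat → List Char → Nat → List (Bool × Int × Char)
  | 0, _, _ => []
  | fuel + 1, s, i =>
    if i < s.length then
      if PySem.Chars.isdigit (s.getD i ' ') then
        (true, pyIntOfDigits (PySem.List.slice s (some (i : Int)) (some (runEndAt s i : Int))),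
          s.getD i ' ') :: tokensB fuel s (runEndAt s i)
      else
        (false, 0, s.getD i ' ') :: tokensB fuel s (i + 1)
    else []

-- Source B's zip loop over the two token lists
def cmpTokens (str1 str2 : String) (n1 n2 : Nat) :
    List (Bool × Int × Char) → List (Bool × Int × Char) → String
  | (d1, v1, c1) :: r1, (d2, v2, c2) :: r2 =>
    if d1 && d2 then
      if v1 ≠ v2 then if v1 < v2 then str1 else str2
      else cmpTokens str1 str2 n1 n2 r1 r2
    else if PySem.Chars.isalpha c1 && PySem.Chars.isalpha c2 && (c1 == c2) then
      cmpTokens str1 str2 n1 n2 r1 r2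
    else if c1 < c2 then str1 else str2
  | _, _ => if n1 < n2 then str1 else str2

def shortest_string_alt (str1 : String) (str2 : String) : String :=
  cmpTokens str1 str2 str1.toList.length str2.toList.length
    (tokensB str1.toList.length str1.toList 0) (tokensB str2.toList.length str2.toList 0)

-- ===== PRECONDITION & SPEC =====
def Spec_shortest_string (str1 : String) (str2 : String) (out : String) : Prop := out = shortest_string_alt str1 str2
instance (str1 : String) (str2 : String) (out : String) : Decidable (Spec_shortest_string str1 str2 out) := by unfold Spec_shortest_string; infer_instance

-- ===== CLAIM (what is proved, stated in full; the proofs are below) =====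
def Claim_equal_shortest_string : Prop := ∀ (str1 : String) (str2 : String), Dom_shortest_string str1 str2 → Spec_shortest_string str1 str2 (shortest_string str1 str2)

-- ===== LEMMAS AND PROOFS =====

lemma alpha_not_digit (c : Char) (h : PySem.Chars.isalpha c) :
    PySem.Chars.isdigit c = false := by
  simp only [PySem.Chars.isalpha, PySem.Chars.isupper, PySem.Chars.islower,
    Bool.or_eq_true, Bool.and_eq_true, decide_eq_true_eq] at h
  rcases h with ⟨h1, _⟩ | ⟨h1, _⟩ <;>
    · have h9 : ¬(c ≤ '9') := fun hle => absurd (le_trans h1 hle) (by decide)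
      simp [PySem.Chars.isdigit, h9]

lemma digit_not_alpha (c : Char) (h : PySem.Chars.isdigit c) :
    PySem.Chars.isalpha c = false := by
  cases ha : PySem.Chars.isalpha c
  · rfl
  · rw [alpha_not_digit c ha] at h; exact absurd h (by simp)

lemma runEnd_ge (f : Nat) (s : List Char) : ∀ j, j ≤ runEnd f s j := by
  induction f with
  | zero => intro j; simp [runEnd]
  | succ f ih =>
    intro j
    simp only [runEnd]
    split
    · exact le_trans (Nat.le_succ j) (ih (j + 1))
    · exact le_refl j

lemma runEndAt_ge (s : List Char) (j : Nat) : j ≤ runEndAt s j := runEnd_ge _ s j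

lemma runEndAt_step (s : List Char) (j : Nat) (h1 : j < s.length)
    (h2 : PySem.Chars.isdigit (s.getD j ' ')) : runEndAt s j = runEndAt s (j + 1) := by
  unfold runEndAt
  have e : s.length - j = (s.length - (j + 1)) + 1 := by omega
  rw [e]
  simp only [runEnd, if_pos (⟨h1, h2⟩ : j < s.length ∧ PySem.Chars.isdigit (s.getD j ' ') = true)]

lemma runEndAt_stop (s : List Char) (j : Nat)
    (h : ¬(j < s.length ∧ PySem.Chars.isdigit (s.getD j ' ') = true)) : runEndAt s j = j := by
  unfold runEndAt
  cases e : s.length - j with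
  | zero => rfl
  | succ f => simp only [runEnd, if_neg h]

lemma runEndAt_gt (s : List Char) (j : Nat) (h1 : j < s.length)
    (h2 : PySem.Chars.isdigit (s.getD j ' ')) : j < runEndAt s j := by
  rw [runEndAt_step s j h1 h2]
  exact lt_of_lt_of_le (Nat.lt_succ_self j) (runEndAt_ge s (j + 1))

lemma tokensB_fuel (s : List Char) :
    ∀ f g i, s.length - i ≤ f → s.length - i ≤ g → tokensB f s i = tokensB g s i := by
  intro f
  induction f with
  | zero =>
    intro g i hf _
    cases g with
    | zero => rfl
    | succ g => simp only [tokensB]; rw [if_neg (by omega)]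
  | succ f ih =>
    intro g i hf hg
    cases g with
    | zero => simp only [tokensB]; rw [if_neg (by omega)]
    | succ g =>
      simp only [tokensB]
      by_cases hi : i < s.length
      · rw [if_pos hi, if_pos hi]
        by_cases hd : PySem.Chars.isdigit (s.getD i ' ')
        · rw [if_pos hd, if_pos hd]
          have hgt := runEndAt_gt s i hi hd
          rw [ih g (runEndAt s i) (by omega) (by omega)]
        · rw [if_neg hd, if_neg hd, ih g (i + 1) (by omega) (by omega)]
      · rw [if_neg hi, if_neg hi]

lemma tokensB_nil (f : Nat) (s : List Char) (i : Nat) (h : s.length ≤ i) :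
    tokensB f s i = [] := by
  cases f with
  | zero => rfl
  | succ f => simp only [tokensB]; rw [if_neg (by omega)]

lemma tokensB_digit (s : List Char) (i : Nat) (h1 : i < s.length)
    (h2 : PySem.Chars.isdigit (s.getD i ' ')) :
    tokensB (s.length - i) s i =
      (true, pyIntOfDigits (PySem.List.slice s (some (i : Int)) (some (runEndAt s i : Int))),
        s.getD i ' ') :: tokensB (s.length - runEndAt s i) s (runEndAt s i) := by
  have e : s.length - i = (s.length - (i + 1)) + 1 := by omega
  rw [e]
  simp only [tokensB]
  rw [if_pos h1, if_pos h2]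
  have hgt := runEndAt_gt s i h1 h2
  rw [tokensB_fuel s (s.length - (i + 1)) (s.length - runEndAt s i) (runEndAt s i)
    (by omega) (by omega)]

lemma tokensB_nondigit (s : List Char) (i : Nat) (h1 : i < s.length)
    (h2 : PySem.Chars.isdigit (s.getD i ' ') = false) :
    tokensB (s.length - i) s i = (false, 0, s.getD i ' ') :: tokensB (s.length - (i + 1)) s (i + 1) := by
  have e : s.length - i = (s.length - (i + 1)) + 1 := by omega
  rw [e]
  simp only [tokensB]
  rw [if_pos h1, if_neg (fun hh => absurd hh (by rw [h2]; exact Bool.false_ne_true))]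

lemma parse_number_loop_spec (s : List Char) :
    ∀ (f i n : Nat) (acc : List Char), s.length - i ≤ f →
    parse_number_loop f s i n acc =
      (pyIntOfDigits (acc ++ (s.drop i).take (runEndAt s i - i)), n + (runEndAt s i - i)) := by
  intro f
  induction f with
  | zero =>
    intro i n acc hf
    have hstop : runEndAt s i = i := runEndAt_stop s i (by intro hh; omega)
    simp [parse_number_loop, hstop]
  | succ f ih =>
    intro i n acc hf
    simp only [parse_number_loop]
    by_cases h : i < s.length ∧ PySem.Chars.isdigit (s.getD i ' ') = true
    · rw [if_pos h, ih (i + 1) (n + 1) _ (by omega)]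
      have hre : runEndAt s i = runEndAt s (i + 1) := runEndAt_step s i h.1 h.2
      have hge := runEndAt_ge s (i + 1)
      have hdrop : s.drop i = s.getD i ' ' :: s.drop (i + 1) := by
        rw [List.getD_eq_getElem _ _ h.1]
        exact List.drop_eq_getElem_cons h.1
      have htake : (s.drop i).take (runEndAt s i - i)
          = s.getD i ' ' :: (s.drop (i + 1)).take (runEndAt s (i + 1) - (i + 1)) := by
        rw [hdrop, hre]
        have e1 : runEndAt s (i + 1) - i = (runEndAt s (i + 1) - (i + 1)) + 1 := by omega
        rw [e1, List.take_succ_cons]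
      rw [htake]
      simp only [Prod.mk.injEq]
      constructor
      · simp
      · omega
    · rw [if_neg h]
      have hstop : runEndAt s i = i := runEndAt_stop s i h
      simp [hstop]

lemma parse_number_spec (s : List Char) (i : Nat) :
    parse_number s i =
      (pyIntOfDigits ((s.drop i).take (runEndAt s i - i)), runEndAt s i - i) := by
  unfold parse_number
  rw [parse_number_loop_spec s (s.length - i) i 0 [] (le_refl _)]
  simp

lemma parse_val (s : List Char) (i : Nat) :
    (parse_number s i).1 =
      pyIntOfDigits (PySem.List.slice s (some (i : Int)) (some (runEndAt s i : Int))) := by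
  rw [parse_number_spec, PySem.List.slice_natCast]

lemma cmpTokens_nil_left (str1 str2 : String) (n1 n2 : Nat) (t : List (Bool × Int × Char)) :
    cmpTokens str1 str2 n1 n2 [] t = if n1 < n2 then str1 else str2 := by
  cases t <;> rfl

lemma cmpTokens_nil_right (str1 str2 : String) (n1 n2 : Nat) (t : List (Bool × Int × Char)) :
    cmpTokens str1 str2 n1 n2 t [] = if n1 < n2 then str1 else str2 := by
  cases t with
  | nil => rfl
  | cons x r => obtain ⟨d, v, c⟩ := x; rfl

-- in the mixed case (not both alpha, not both digit) both token heads carry the current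
-- characters and neither comparison guard of cmpTokens fires
lemma mixed_heads (l1 l2 : List Char) (s1 s2 : Nat) (h1 : s1 < l1.length) (h2 : s2 < l2.length)
    (ha : ¬(PySem.Chars.isalpha (l1.getD s1 ' ') && PySem.Chars.isalpha (l2.getD s2 ' ')) = true)
    (hd : ¬(PySem.Chars.isdigit (l1.getD s1 ' ') && PySem.Chars.isdigit (l2.getD s2 ' ')) = true) :
    ∃ b1 b2 : Bool × Int × Char,
      (tokensB (l1.length - s1) l1 s1 =
         (b1.1, b1.2.1, l1.getD s1 ' ') ::
           tokensB (l1.length - (if b1.1 then runEndAt l1 s1 else s1 + 1)) l1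
             (if b1.1 then runEndAt l1 s1 else s1 + 1) ∧
       tokensB (l2.length - s2) l2 s2 =
         (b2.1, b2.2.1, l2.getD s2 ' ') ::
           tokensB (l2.length - (if b2.1 then runEndAt l2 s2 else s2 + 1)) l2
             (if b2.1 then runEndAt l2 s2 else s2 + 1)) ∧
      ((b1.1 && b2.1) = false ∧
       ((PySem.Chars.isalpha (l1.getD s1 ' ') && PySem.Chars.isalpha (l2.getD s2 ' ')) && (l1.getD s1 ' ' == l2.getD s2 ' ')) = false) := by
  simp only [Bool.and_eq_true, not_and] at ha hd
  cases hb1 : PySem.Chars.isdigit (l1.getD s1 ' ') <;>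
    cases hb2 : PySem.Chars.isdigit (l2.getD s2 ' ')
  · refine ⟨(false, 0, l1.getD s1 ' '), (false, 0, l2.getD s2 ' '), ⟨?_, ?_⟩, rfl, ?_⟩
    · simpa using tokensB_nondigit l1 s1 h1 hb1
    · simpa using tokensB_nondigit l2 s2 h2 hb2
    · by_cases hal : PySem.Chars.isalpha (l1.getD s1 ' ') = true
      · rw [eq_false_of_ne_true (ha hal), Bool.and_false, Bool.false_and]
      · rw [eq_false_of_ne_true hal, Bool.false_and, Bool.false_and]
  · refine ⟨(false, 0, l1.getD s1 ' '),
      (true, pyIntOfDigits (PySem.List.slice l2 (some (s2 : Int)) (some (runEndAt l2 s2 : Int))), l2.getD s2 ' '),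
      ⟨?_, ?_⟩, rfl, ?_⟩
    · simpa using tokensB_nondigit l1 s1 h1 hb1
    · simpa using tokensB_digit l2 s2 h2 hb2
    · rw [digit_not_alpha _ hb2, Bool.and_false, Bool.false_and]
  · refine ⟨(true, pyIntOfDigits (PySem.List.slice l1 (some (s1 : Int)) (some (runEndAt l1 s1 : Int))), l1.getD s1 ' '),
      (false, 0, l2.getD s2 ' '), ⟨?_, ?_⟩, Bool.and_false _, ?_⟩
    · simpa using tokensB_digit l1 s1 h1 hb1
    · simpa using tokensB_nondigit l2 s2 h2 hb2
    · rw [digit_not_alpha _ hb1, Bool.false_and, Bool.false_and]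
  · exact absurd hb2 (hd hb1)

lemma loopA_eq (str1 str2 : String) (l1 l2 : List Char) :
    ∀ (fuel s1 s2 : Nat), l1.length - s1 + (l2.length - s2) < fuel →
    loopA str1 str2 l1 l2 fuel s1 s2 =
      cmpTokens str1 str2 l1.length l2.length
        (tokensB (l1.length - s1) l1 s1) (tokensB (l2.length - s2) l2 s2) := by
  intro fuel
  induction fuel with
  | zero => intro s1 s2 hb; omega
  | succ fuel ih =>
    intro s1 s2 hb
    simp only [loopA]
    by_cases hc : (s1 : Int) ≤ (l1.length : Int) - 1 ∧ (s2 : Int) ≤ (l2.length : Int) - 1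
    · rw [if_pos hc]
      by_cases hA : (PySem.Chars.isalpha (l1.getD s1 ' ') && PySem.Chars.isalpha (l2.getD s2 ' ')) = true
      · rw [if_pos hA]
        simp only [Bool.and_eq_true] at hA
        rw [tokensB_nondigit l1 s1 (by omega) (alpha_not_digit _ hA.1),
            tokensB_nondigit l2 s2 (by omega) (alpha_not_digit _ hA.2)]
        by_cases heq : l1.getD s1 ' ' = l2.getD s2 ' '
        · rw [if_pos heq]
          have := ih (s1 + 1) (s2 + 1) (by omega)
          simp only [List.getD_eq_getElem?_getD] at hA heq ⊢
          simpa [cmpTokens, hA.1, hA.2, heq] using this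
        · rw [if_neg heq]
          simp only [List.getD_eq_getElem?_getD] at hA heq ⊢
          by_cases hlt : l1[s1]?.getD ' ' < l2[s2]?.getD ' '
          · rw [if_pos hlt]; simp [cmpTokens, hA.1, hA.2, heq, hlt]
          · rw [if_neg hlt]; simp [cmpTokens, hA.1, hA.2, heq, hlt]
      · rw [if_neg hA]
        by_cases hD : (PySem.Chars.isdigit (l1.getD s1 ' ') && PySem.Chars.isdigit (l2.getD s2 ' ')) = true
        · rw [if_pos hD]
          simp only [Bool.and_eq_true] at hD
          rw [tokensB_digit l1 s1 (by omega) hD.1, tokensB_digit l2 s2 (by omega) hD.2,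
              ← parse_val l1 s1, ← parse_val l2 s2]
          by_cases hne : (parse_number l1 s1).1 ≠ (parse_number l2 s2).1
          · rw [if_pos hne]
            by_cases hlt : (parse_number l1 s1).1 < (parse_number l2 s2).1
            · rw [if_pos hlt]; simp [cmpTokens, hne, hlt]
            · rw [if_neg hlt]; simp [cmpTokens, hne, hlt]
          · rw [if_neg hne]
            have veq : (parse_number l1 s1).1 = (parse_number l2 s2).1 := not_not.mp hne
            have e1 : s1 + (parse_number l1 s1).2 = runEndAt l1 s1 := by
              have := runEndAt_ge l1 s1
              rw [parse_number_spec]; omega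
            have e2 : s2 + (parse_number l2 s2).2 = runEndAt l2 s2 := by
              have := runEndAt_ge l2 s2
              rw [parse_number_spec]; omega
            have hg1 := runEndAt_gt l1 s1 (by omega) hD.1
            have hg2 := runEndAt_gt l2 s2 (by omega) hD.2
            have := ih (s1 + (parse_number l1 s1).2) (s2 + (parse_number l2 s2).2)
              (by rw [e1, e2]; omega)
            rw [e1, e2] at this ⊢
            simpa [cmpTokens, veq] using this
        · rw [if_neg hD]
          rcases mixed_heads l1 l2 s1 s2 (by omega) (by omega) hA hD with ⟨b1, b2, hbb, hg⟩
          rw [hbb.1, hbb.2]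
          simp only [cmpTokens]
          have hng1 : ¬((b1.1 && b2.1) = true) := by
            rw [hg.1]; exact Bool.false_ne_true
          have hng2 : ¬(((PySem.Chars.isalpha (l1.getD s1 ' ') && PySem.Chars.isalpha (l2.getD s2 ' ')) && (l1.getD s1 ' ' == l2.getD s2 ' ')) = true) := by
            rw [hg.2]; exact Bool.false_ne_true
          rw [if_neg hng1, if_neg hng2]
    · rw [if_neg hc]
      have h : l1.length ≤ s1 ∨ l2.length ≤ s2 := by omega
      rcases h with h | h
      · rw [tokensB_nil _ l1 s1 h, cmpTokens_nil_left]
        by_cases hlen : (l1.length : Int) - 1 < (l2.length : Int) - 1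
        · rw [if_pos hlen, if_pos (by omega)]
        · rw [if_neg hlen, if_neg (by omega)]
      · rw [tokensB_nil _ l2 s2 h, cmpTokens_nil_right]
        by_cases hlen : (l1.length : Int) - 1 < (l2.length : Int) - 1
        · rw [if_pos hlen, if_pos (by omega)]
        · rw [if_neg hlen, if_neg (by omega)]

-- ===== VERDICT (by name: the statement is the Claim_ definition above) =====
theorem shortest_string_spec : Claim_equal_shortest_string := by
  intro str1 str2 _
  unfold Spec_shortest_string shortest_string shortest_string_alt
  have := loopA_eq str1 str2 str1.toList str2.toList
    (str1.toList.length + str2.toList.length + 1) 0 0 (by omega)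
  simpa using this
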